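-- pv_equiv track=rewrite | github.com/sjyjytu/elevator_clean2 | smec_iteration_findbest.py | get_k_elev_group
-- ===== SOURCE A (Python) =====
-- def get_k_elev_group(k, elev_num=4):
--     tmp_result = [[i] for i in range(elev_num)]
--     for i in range(k - 1):
--         result = []
--         for tr in tmp_result:
--             for j in range(elev_num):
--                 result.append(tr + [j])
--         tmp_result = result
--     return tmp_result
-- ===== SOURCE B (Python) =====
-- def get_k_elev_group(k, elev_num=4):
--     # Enumerate the k-length tuples over range(elev_num) by decoding each
--     # index in range(elev_num ** k) into its k base-elev_num digits,
--     # most-significant first (lexicographic order).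
--     result = []
--     for idx in range(elev_num ** k):
--         digits = []
--         for _ in range(k):
--             idx, r = divmod(idx, elev_num)
--             digits.append(r)
--         digits.reverse()
--         result.append(digits)
--     return result
-- ===== Notes on version B (the rewrite author's own statement) =====
-- stated objective: alternative
-- what changed: Instead of growing the cartesian product layer by layer (k-1 passes that rebuild the whole list), B computes elev_num**k and decodes each index into its k base-elev_num digits (repeated divmod, reversed) in one pass; Pre_ excludes k < 0, where A's range(k-1) quirk still returns single-coordinate lists but B's elev_num**k raises, and the nonsensical corner elev_num < 0 with even k >= 2, where A returns [] but B's digit decoding over a negative base is meaningless.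
-- intended difference: For k = 0 (with elev_num >= 0), A returns [[0],...,[elev_num-1]] because its seeding loop already emits one-coordinate lists, while B returns [[]], the single empty tuple, which is the intended set of 0-length tuples. — e.g. on get_k_elev_group(0, 2): A returns [[0], [1]], B returns [[]]
-- outside the precondition, e.g. on get_k_elev_group(-1, 2): A returns [[0], [1]], B raises TypeError; on get_k_elev_group(2, -2): A returns [], B returns [[0, 0], [-1, -1], [-1, 0], [0, -1]]
import Mathlib
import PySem

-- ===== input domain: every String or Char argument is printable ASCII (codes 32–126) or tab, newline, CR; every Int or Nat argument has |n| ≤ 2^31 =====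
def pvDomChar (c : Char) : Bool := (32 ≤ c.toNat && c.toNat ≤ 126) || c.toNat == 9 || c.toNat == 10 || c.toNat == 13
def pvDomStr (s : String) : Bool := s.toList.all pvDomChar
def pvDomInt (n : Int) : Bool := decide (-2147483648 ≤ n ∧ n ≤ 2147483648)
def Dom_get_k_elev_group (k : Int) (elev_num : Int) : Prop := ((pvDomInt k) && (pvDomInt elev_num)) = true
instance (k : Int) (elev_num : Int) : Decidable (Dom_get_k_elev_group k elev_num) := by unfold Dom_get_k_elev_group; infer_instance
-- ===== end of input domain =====

-- B replaces A's layer-by-layer cartesian-product construction by base-elev_num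
-- index decoding (same order, a genuinely different single-pass decomposition).

-- ===== PORT A =====
def get_k_elev_group (k : Int) (elev_num : Int) : List (List Int) :=
  let tmp0 : List (List Int) := (PySem.List.pyRange 0 elev_num 1).map (fun i => [i])
  (PySem.List.pyRange 0 (k - 1) 1).foldl
    (fun tmp_result _ =>
      tmp_result.foldl
        (fun result tr =>
          (PySem.List.pyRange 0 elev_num 1).foldl (fun result j => result ++ [tr ++ [j]]) result)
        [])
    tmp0

-- ===== PORT B =====
-- inner loop: 'for _ in range(k): idx, r = divmod(idx, elev_num); digits.append(r)'
def gkInner : Nat → Int → Int → List Int → Int × List Int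
  | 0, idx, _, ds => (idx, ds)
  | n+1, idx, e, ds => gkInner n (PySem.Int.floordiv idx e) e (ds ++ [PySem.Int.mod idx e])

def get_k_elev_group_alt (k : Int) (elev_num : Int) : List (List Int) :=
  (PySem.List.pyRange 0 (elev_num ^ k.toNat) 1).foldl
    (fun result idx => result ++ [((gkInner k.toNat idx elev_num []).2).reverse]) []

-- ===== PRECONDITION & SPEC =====
-- Pre_ excludes k < 0, where A's 'range(k-1)' quirk still returns single-coordinate
-- lists but B's 'elev_num ** k' RAISES (TypeError/ZeroDivisionError), and the
-- nonsensical corner elev_num < 0 with even k ≥ 2, outside the natural domain,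
-- where A returns [] but B's digit decoding over a negative base is meaningless.
def Pre_get_k_elev_group (k : Int) (elev_num : Int) : Prop :=
  0 ≤ k ∧ ¬ (elev_num < 0 ∧ 2 ≤ k ∧ k % 2 = 0)
instance (k : Int) (elev_num : Int) : Decidable (Pre_get_k_elev_group k elev_num) := by unfold Pre_get_k_elev_group; infer_instance
def pvWitness_get_k_elev_group : Int × Int := (2, 3)

-- For k = 0 (with elev_num ≥ 0), A returns [[0],…,[elev_num-1]] because its seeding
-- loop already emits one-coordinate lists, while B returns [[]], the single empty
-- tuple, which is the intended set of 0-length tuples.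
def D_get_k_elev_group (k : Int) (elev_num : Int) : Prop := k = 0
instance (k : Int) (elev_num : Int) : Decidable (D_get_k_elev_group k elev_num) := by unfold D_get_k_elev_group; infer_instance

def Spec_get_k_elev_group (k : Int) (elev_num : Int) (out : List (List Int)) : Prop := ¬ D_get_k_elev_group k elev_num → out = get_k_elev_group_alt k elev_num
instance (k : Int) (elev_num : Int) (out : List (List Int)) : Decidable (Spec_get_k_elev_group k elev_num out) := by unfold Spec_get_k_elev_group; infer_instance

def pvDiffWitness_get_k_elev_group : Int × Int := (0, 2)
def pvDiffWitnessOut_get_k_elev_group : (List (List Int)) × (List (List Int)) := ([[0], [1]], [[]])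

-- ===== CLAIM (what is proved, stated in full; the proofs are below) =====
def Claim_unchanged_get_k_elev_group : Prop := ∀ (k : Int) (elev_num : Int), Dom_get_k_elev_group k elev_num → Pre_get_k_elev_group k elev_num → Spec_get_k_elev_group k elev_num (get_k_elev_group k elev_num)
def Claim_changed_get_k_elev_group : Prop := Dom_get_k_elev_group (pvDiffWitness_get_k_elev_group.1) (pvDiffWitness_get_k_elev_group.2) ∧ Pre_get_k_elev_group (pvDiffWitness_get_k_elev_group.1) (pvDiffWitness_get_k_elev_group.2) ∧ D_get_k_elev_group (pvDiffWitness_get_k_elev_group.1) (pvDiffWitness_get_k_elev_group.2) ∧ get_k_elev_group (pvDiffWitness_get_k_elev_group.1) (pvDiffWitness_get_k_elev_group.2) = pvDiffWitnessOut_get_k_elev_group.1 ∧ get_k_elev_group_alt (pvDiffWitness_get_k_elev_group.1) (pvDiffWitness_get_k_elev_group.2) = pvDiffWitnessOut_get_k_elev_group.2 ∧ pvDiffWitnessOut_get_k_elev_group.1 ≠ pvDiffWitnessOut_get_k_elev_group.2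
def Claim_exact_get_k_elev_group : Prop := ∀ (k : Int) (elev_num : Int), Dom_get_k_elev_group k elev_num → Pre_get_k_elev_group k elev_num → D_get_k_elev_group k elev_num → get_k_elev_group k elev_num ≠ get_k_elev_group_alt k elev_num

-- ===== LEMMAS AND PROOFS =====

-- proof-side decoder: the m base-e digits of i, most-significant first
def pvDec (e : Nat) : Nat → Nat → List Int
  | 0, _ => []
  | m+1, i => pvDec e m (i / e) ++ [((i % e : Nat) : Int)]

-- accumulate-append fold is an append of a flatMap
theorem pv_foldl_app {α β : Type} (h : α → List β) :
    ∀ (l : List α) (acc : List β), l.foldl (fun r x => r ++ h x) acc = acc ++ l.flatMap h := by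
  intro l
  induction l with
  | nil => intro acc; simp
  | cons a t ih => intro acc; simp [List.foldl, ih]

theorem pv_flatMap_single {α β : Type} (f : α → β) (l : List α) :
    l.flatMap (fun x => [f x]) = l.map f := by
  induction l with
  | nil => rfl
  | cons a t ih => simp [ih]

-- a fold ignoring the elements is an iterate
theorem pv_foldl_const {α β : Type} (g : α → α) :
    ∀ (l : List β) (init : α), l.foldl (fun t _ => g t) init = g^[l.length] init := by
  intro l
  induction l with
  | nil => intro init; simp
  | cons a t ih => intro init; simp [List.foldl, ih, Function.iterate_succ_apply]

theorem pv_range_mul (b : Nat) :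
    ∀ (a : Nat), List.range (a * b) =
      (List.range a).flatMap (fun q => (List.range b).map (fun (r : Nat) => q * b + r)) := by
  intro a
  induction a with
  | zero => simp
  | succ n ih =>
    have h : (n + 1) * b = n * b + b := by ring
    rw [h, List.range_add, List.range_succ]
    simp [ih]

theorem pv_gkInner (eN : Nat) :
    ∀ (m : Nat) (i : Nat) (ds : List Int),
      (gkInner m (i : Int) (eN : Int) ds).2 = ds ++ (pvDec eN m i).reverse := by
  intro m
  induction m with
  | zero => intro i ds; simp [gkInner, pvDec]
  | succ n ih =>
    intro i ds
    rw [gkInner, PySem.Int.floordiv_natCast, PySem.Int.mod_natCast, ih]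
    simp [pvDec]

-- the A-side layer step
def pvStep (eN : Nat) (tmp : List (List Int)) : List (List Int) :=
  tmp.flatMap (fun tr => (List.range eN).map (fun (j : Nat) => tr ++ [(j : Int)]))

theorem pv_pyRange_nat (eN : Nat) :
    PySem.List.pyRange 0 (eN : Int) 1 = (List.range eN).map (fun (i : Nat) => (i : Int)) := by
  rw [PySem.List.pyRange_one]
  simp only [sub_zero, Int.toNat_natCast, zero_add]

theorem pv_stepA (eN : Nat) (tmp : List (List Int)) :
    tmp.foldl
      (fun result tr =>
        (PySem.List.pyRange 0 (eN : Int) 1).foldl (fun result j => result ++ [tr ++ [j]]) result)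
      [] = pvStep eN tmp := by
  have hfun : (fun (result : List (List Int)) (tr : List Int) =>
      (PySem.List.pyRange 0 (eN : Int) 1).foldl (fun result j => result ++ [tr ++ [j]]) result)
      = fun result tr => result ++ (List.range eN).map (fun (j : Nat) => tr ++ [(j : Int)]) := by
    funext result tr
    rw [pv_foldl_app (fun j => [tr ++ [j]]) (PySem.List.pyRange 0 (eN : Int) 1) result,
        pv_pyRange_nat, List.flatMap_map, pv_flatMap_single]
  rw [hfun,
      pv_foldl_app (fun tr => (List.range eN).map (fun (j : Nat) => tr ++ [(j : Int)])) tmp []]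
  simp [pvStep]

theorem pv_dec_step (eN : Nat) (he : 0 < eN) (m q r : Nat) (hr : r < eN) :
    pvDec eN (m + 1) (q * eN + r) = pvDec eN m q ++ [(r : Int)] := by
  have h1 : (q * eN + r) / eN = q := by
    rw [Nat.mul_comm q eN, Nat.mul_add_div he]
    simp [Nat.div_eq_of_lt hr]
  have h2 : (q * eN + r) % eN = r := by
    rw [Nat.mul_comm q eN, Nat.mul_add_mod]
    exact Nat.mod_eq_of_lt hr
  simp [pvDec, h1, h2]

theorem pv_main (eN : Nat) (he : 0 < eN) :
    ∀ (n : Nat),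
      (pvStep eN)^[n] ((List.range eN).map (fun (i : Nat) => [(i : Int)]))
        = (List.range (eN ^ (n + 1))).map (fun (i : Nat) => pvDec eN (n + 1) i) := by
  intro n
  induction n with
  | zero =>
    rw [Function.iterate_zero, id_eq, pow_one]
    apply List.map_congr_left
    intro i hi
    have h : i % eN = i := Nat.mod_eq_of_lt (List.mem_range.mp hi)
    simp [pvDec, h]
  | succ n ih =>
    rw [Function.iterate_succ_apply', ih]
    have hpow : eN ^ (n + 1 + 1) = eN ^ (n + 1) * eN := by ring
    rw [hpow, pv_range_mul eN (eN ^ (n + 1))]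
    unfold pvStep
    rw [List.flatMap_map, List.map_flatMap]
    refine List.flatMap_congr ?_
    intro q hq
    rw [List.map_map]
    refine List.map_congr_left ?_
    intro r hr
    show pvDec eN (n + 1) q ++ [(r : Int)] = pvDec eN (n + 1 + 1) (q * eN + r)
    exact (pv_dec_step eN he (n + 1) q r (List.mem_range.mp hr)).symm

-- B's port is the decoder map
theorem pv_alt_eq (k : Int) (eN : Nat) :
    get_k_elev_group_alt k (eN : Int)
      = (List.range (eN ^ k.toNat)).map (fun (i : Nat) => pvDec eN k.toNat i) := by
  unfold get_k_elev_group_alt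
  set kk : Nat := k.toNat with hkk
  have hcast : ((eN : Int)) ^ kk = ((eN ^ kk : Nat) : Int) := by push_cast; ring
  rw [hcast, pv_pyRange_nat (eN ^ kk),
      pv_foldl_app (fun idx => [((gkInner kk idx (eN : Int) []).2).reverse])
        ((List.range (eN ^ kk)).map (fun (i : Nat) => (i : Int))) [],
      List.flatMap_map]
  simp only [List.nil_append]
  rw [pv_flatMap_single (fun (i : Nat) => ((gkInner kk (i : Int) (eN : Int) []).2).reverse)]
  apply List.map_congr_left
  intro i _
  rw [pv_gkInner eN kk i []]
  simp

theorem get_k_elev_group_eq (k : Int) (e : Int) (hk : 1 ≤ k) (he : 0 ≤ e) :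
    get_k_elev_group k e = get_k_elev_group_alt k e := by
  obtain ⟨eN, rfl⟩ : ∃ m : Nat, e = (m : Int) := ⟨e.toNat, (Int.toNat_of_nonneg he).symm⟩
  by_cases hzero : eN = 0
  · -- both sides are [] when elev_num = 0 and k ≥ 1
    subst hzero
    rw [pv_alt_eq]
    have hk0 : 0 < k.toNat := by omega
    rw [Nat.zero_pow hk0]
    simp only [List.range_zero, List.map_nil]
    simp only [get_k_elev_group, Nat.cast_zero]
    rw [PySem.List.pyRange_one_eq_nil (by omega : (0:Int) ≤ 0)]
    simp only [List.map_nil]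
    generalize PySem.List.pyRange 0 (k - 1) 1 = l
    induction l with
    | nil => rfl
    | cons a t ih => exact ih
  · have heN : 0 < eN := Nat.pos_of_ne_zero hzero
    simp only [get_k_elev_group]
    have hcongr :
        (fun (tmp_result : List (List Int)) (_ : Int) =>
          tmp_result.foldl
            (fun result tr =>
              (PySem.List.pyRange 0 (eN : Int) 1).foldl
                (fun result j => result ++ [tr ++ [j]]) result) [])
        = fun tmp _ => pvStep eN tmp := by
      funext tmp x
      exact pv_stepA eN tmp
    rw [hcongr, pv_foldl_const (pvStep eN), PySem.List.length_pyRange_one,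
        pv_pyRange_nat eN, List.map_map]
    have hbase : (List.range eN).map ((fun i => [i]) ∘ fun (i : Nat) => (i : Int))
        = (List.range eN).map (fun (i : Nat) => [(i : Int)]) := rfl
    rw [hbase, pv_main eN heN, pv_alt_eq k eN]
    have hkk : (k - 1 - 0).toNat + 1 = k.toNat := by omega
    rw [hkk]

-- ===== VERDICT (by name: the statements are the Claim_ definitions above) =====
-- with a negative elevator count and odd k ≥ 1 both programs return []
theorem get_k_elev_group_eq_neg (k : Int) (e : Int) (hk : 1 ≤ k) (hodd : k % 2 = 1)
    (he : e < 0) : get_k_elev_group k e = get_k_elev_group_alt k e := by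
  have hA : get_k_elev_group k e = [] := by
    simp only [get_k_elev_group]
    rw [PySem.List.pyRange_one_eq_nil (by omega : e ≤ 0)]
    simp only [List.map_nil]
    generalize PySem.List.pyRange 0 (k - 1) 1 = l
    induction l with
    | nil => rfl
    | cons a t ih => exact ih
  have hoddN : Odd k.toNat := by
    refine Nat.odd_iff.mpr ?_
    omega
  have hpow : e ^ k.toNat < 0 := Odd.pow_neg hoddN he
  have hB : get_k_elev_group_alt k e = [] := by
    simp only [get_k_elev_group_alt]
    rw [PySem.List.pyRange_one_eq_nil (by omega : e ^ k.toNat ≤ 0)]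
    rfl
  rw [hA, hB]

-- ===== VERDICT (by name: the statements are the Claim_ definitions above) =====
theorem get_k_elev_group_spec : Claim_unchanged_get_k_elev_group := by
  intro k e _ hpre hnd
  have hk : 1 ≤ k := by
    have : k ≠ 0 := fun h => hnd h
    rcases hpre with ⟨hk0, _⟩
    omega
  by_cases he : 0 ≤ e
  · exact get_k_elev_group_eq k e hk he
  · have hodd : k % 2 = 1 := by
      rcases hpre with ⟨hk0, hnotc⟩
      by_contra hne
      exact hnotc ⟨by omega, by omega, by omega⟩
    exact get_k_elev_group_eq_neg k e hk hodd (by omega)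

theorem get_k_elev_group_changed : Claim_changed_get_k_elev_group := by
  unfold Claim_changed_get_k_elev_group; decide

theorem get_k_elev_group_tight : Claim_exact_get_k_elev_group := by
  intro k e _ hpre hd heq
  subst hd
  have halt : get_k_elev_group_alt 0 e = [[]] := by
    simp only [get_k_elev_group_alt, Int.toNat_zero, pow_zero]
    rw [show PySem.List.pyRange 0 1 1 = [0] from by decide]
    rfl
  have hA : get_k_elev_group 0 e = (PySem.List.pyRange 0 e 1).map (fun i => [i]) := by
    simp only [get_k_elev_group]
    rw [PySem.List.pyRange_one_eq_nil (by omega : (0:Int) - 1 ≤ 0)]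
    rfl
  rw [hA, halt] at heq
  have hm : ([] : List Int) ∈ (PySem.List.pyRange 0 e 1).map (fun i => [i]) := by
    rw [heq]; simp
  simp at hm
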